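-- pv_equiv track=rewrite | github.com/intent-tensor-theory/git_0.0_-astrosynthesis | parse_book.py | clean_format2_blocks
-- ===== SOURCE A (Python) =====
-- def clean_format2_blocks(lines):
--     """Convert [ ... LaTeX ... ] blocks to $$ ... $$ display math."""
--     result = []
--     i = 0
--     while i < len(lines):
--         stripped = lines[i].strip()
--         if stripped == "[":
--             # collect until matching lone ]
--             inner = []
--             i += 1
--             depth = 1
--             while i < len(lines):
--                 s = lines[i].strip()
--                 if s == "[":
--                     depth += 1
--                     inner.append(lines[i])
--                 elif s == "]":
--                     depth -= 1
--                     if depth == 0: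
--                         break
--                     inner.append(lines[i])
--                 else:
--                     inner.append(lines[i])
--                 i += 1
--             body = "\n".join(l.rstrip() for l in inner).strip()
--             if body:
--                 result.append("$$")
--                 for body_line in body.splitlines():
--                     result.append(body_line)
--                 result.append("$$")
--             # i now points at ], advance past it
--         else:
--             result.append(lines[i])
--         i += 1
--     return result
-- ===== SOURCE B (Python) =====
-- def _flush(buf):
--     body = "\n".join(l.rstrip() for l in buf).strip()
--     if body == "":
--         return []
--     return ["$$"] + body.splitlines() + ["$$"]
--
--
-- def clean_format2_blocks(lines):
--     """Convert [ ... LaTeX ... ] blocks to $$ ... $$ display math."""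
--     result = []
--     depth = 0
--     buf = []
--     for line in lines:
--         s = line.strip()
--         if depth == 0:
--             if s == "[":
--                 depth = 1
--                 buf = []
--             else:
--                 result.append(line)
--         elif s == "[":
--             depth += 1
--             buf.append(line)
--         elif s == "]":
--             depth -= 1
--             if depth == 0:
--                 result.extend(_flush(buf))
--             else:
--                 buf.append(line)
--         else:
--             buf.append(line)
--     if depth > 0:
--         result.extend(_flush(buf))
--     return result
-- ===== Notes on version B (the rewrite author's own statement) =====
-- stated objective: simpler
-- what changed: Replaces A's nested while loops sharing a mutable index (with per-index lines[i] accesses) by one flat for-loop over the lines carrying an explicit (depth, buffer) state that flushes the '$$'-wrapped body when depth returns to 0 (and once more after the loop for an unclosed block).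
import Mathlib
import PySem

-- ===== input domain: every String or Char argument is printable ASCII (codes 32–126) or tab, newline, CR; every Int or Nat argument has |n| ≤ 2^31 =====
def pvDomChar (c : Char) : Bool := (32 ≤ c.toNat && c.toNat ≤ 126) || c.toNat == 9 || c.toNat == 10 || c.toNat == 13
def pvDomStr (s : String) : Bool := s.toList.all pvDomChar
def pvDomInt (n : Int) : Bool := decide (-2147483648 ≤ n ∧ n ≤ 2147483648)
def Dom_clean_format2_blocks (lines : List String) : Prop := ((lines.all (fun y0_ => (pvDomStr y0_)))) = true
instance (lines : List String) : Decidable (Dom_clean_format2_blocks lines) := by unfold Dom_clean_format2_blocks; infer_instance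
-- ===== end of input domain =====

-- B replaces A's nested while loops sharing an index by one flat fold carrying (result, depth, buffer); same return value, objective: simpler decomposition.

-- ===== PORT A =====
-- A's inner while loop: collects lines until the matching lone "]" (or end of input);
-- returns (inner, remaining lines after the closing "]").
def pvCollectA : List String → Nat → List String × List String
  | [], _ => ([], [])
  | l :: rest, depth =>
    let s := PySem.Str.strip l
    if s = "[" then
      let (i, r) := pvCollectA rest (depth + 1); (l :: i, r)
    else if s = "]" then
      if depth = 1 then ([], rest)
      else
        let (i, r) := pvCollectA rest (depth - 1); (l :: i, r)
    else
      let (i, r) := pvCollectA rest depth; (l :: i, r)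

-- the body computation + conditional "$$" wrapping A performs after the inner loop
def pvBodyA (inner : List String) : List String :=
  let body := PySem.Str.strip (PySem.Str.join "\n" (inner.map PySem.Str.rstrip))
  if body ≠ "" then "$$" :: (PySem.Str.splitlines body ++ ["$$"]) else []

-- termination helper for the outer loop (cited by decreasing_by)
theorem pvCollectA_len_le : ∀ (rest : List String) (d : Nat),
    (pvCollectA rest d).2.length ≤ rest.length := by
  intro rest
  induction rest with
  | nil => intro d; simp [pvCollectA]
  | cons l t ih =>
    intro d
    simp only [pvCollectA]
    split
    · have := ih (d + 1); simpa using Nat.le_succ_of_le this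
    · split
      · split
        · simp
        · have := ih (d - 1); simpa using Nat.le_succ_of_le this
      · have := ih d; simpa using Nat.le_succ_of_le this

def clean_format2_blocks (lines : List String) : List String :=
  match lines with
  | [] => []
  | l :: rest =>
    if PySem.Str.strip l = "[" then
      let p := pvCollectA rest 1   -- (inner, rest-after-closing-"]")
      pvBodyA p.1 ++ clean_format2_blocks p.2
    else
      l :: clean_format2_blocks rest
termination_by lines.length
decreasing_by
  · have h := pvCollectA_len_le rest 1
    simpa using Nat.lt_succ_of_le h
  · simp

-- ===== PORT B =====
def pvFlushB (buf : List String) : List String :=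
  let body := PySem.Str.strip (PySem.Str.join "\n" (buf.map PySem.Str.rstrip))
  if body = "" then [] else ["$$"] ++ PySem.Str.splitlines body ++ ["$$"]

-- one step of B's single flat loop over the lines; state = (result, depth, buf)
def pvStepB (st : List String × Nat × List String) (line : String) :
    List String × Nat × List String :=
  let (result, depth, buf) := st
  let s := PySem.Str.strip line
  if depth = 0 then
    if s = "[" then (result, 1, [])
    else (result ++ [line], 0, buf)
  else if s = "[" then (result, depth + 1, buf ++ [line])
  else if s = "]" then
    if depth - 1 = 0 then (result ++ pvFlushB buf, 0, buf)
    else (result, depth - 1, buf ++ [line])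
  else (result, depth, buf ++ [line])

def clean_format2_blocks_alt (lines : List String) : List String :=
  match lines.foldl pvStepB ([], 0, []) with
  | (result, depth, buf) => if 0 < depth then result ++ pvFlushB buf else result

-- ===== PRECONDITION & SPEC =====
def Spec_clean_format2_blocks (lines : List String) (out : List String) : Prop := out = clean_format2_blocks_alt lines
instance (lines : List String) (out : List String) : Decidable (Spec_clean_format2_blocks lines out) := by unfold Spec_clean_format2_blocks; infer_instance

-- ===== CLAIM (what is proved, stated in full; the proofs are below) =====
def Claim_equal_clean_format2_blocks : Prop := ∀ (lines : List String), Dom_clean_format2_blocks lines → Spec_clean_format2_blocks lines (clean_format2_blocks lines)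

-- ===== LEMMAS AND PROOFS =====

theorem pvFlushB_eq_pvBodyA (buf : List String) : pvFlushB buf = pvBodyA buf := by
  unfold pvFlushB pvBodyA
  by_cases h : PySem.Str.strip (PySem.Str.join "\n" (buf.map PySem.Str.rstrip)) = "" <;>
    simp [h]

-- finishing step of B, as a function of the final state
def pvFinishB (st : List String × Nat × List String) : List String :=
  match st with
  | (result, depth, buf) => if 0 < depth then result ++ pvFlushB buf else result

theorem alt_eq_finish (lines : List String) :
    clean_format2_blocks_alt lines = pvFinishB (lines.foldl pvStepB ([], 0, [])) := by
  unfold clean_format2_blocks_alt pvFinishB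
  rfl

-- main invariant: B's fold, started in any state, computes A's continuation
theorem pvMain : ∀ (n : Nat) (rest : List String), rest.length ≤ n →
    ∀ (result : List String) (depth : Nat) (buf : List String),
    pvFinishB (rest.foldl pvStepB (result, depth, buf)) =
      if depth = 0 then result ++ clean_format2_blocks rest
      else result ++ pvBodyA (buf ++ (pvCollectA rest depth).1) ++
        clean_format2_blocks (pvCollectA rest depth).2 := by
  intro n
  induction n with
  | zero =>
    intro rest hlen result depth buf
    have : rest = [] := List.eq_nil_of_length_eq_zero (Nat.le_zero.mp hlen)
    subst this
    by_cases h : depth = 0 <;>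
      simp [h, pvFinishB, pvCollectA, clean_format2_blocks, Nat.pos_of_ne_zero,
        pvFlushB_eq_pvBodyA]
  | succ m ih =>
    intro rest hlen result depth buf
    cases rest with
    | nil =>
      by_cases h : depth = 0 <;>
        simp [h, pvFinishB, pvCollectA, clean_format2_blocks, Nat.pos_of_ne_zero,
          pvFlushB_eq_pvBodyA]
    | cons l t =>
      have hlt : t.length ≤ m := by simpa using hlen
      by_cases hd : depth = 0
      · subst hd
        by_cases hs : PySem.Str.strip l = "["
        · -- open a block
          rw [List.foldl_cons]
          have hstep : pvStepB (result, 0, buf) l = (result, 1, []) := by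
            simp [pvStepB, hs]
          rw [hstep, ih t hlt result 1 []]
          rw [show clean_format2_blocks (l :: t) =
                pvBodyA (pvCollectA t 1).1 ++ clean_format2_blocks (pvCollectA t 1).2 from by
              rw [clean_format2_blocks]; simp [hs]]
          simp
        · -- plain line outside any block
          rw [List.foldl_cons]
          have hstep : pvStepB (result, 0, buf) l = (result ++ [l], 0, buf) := by
            simp [pvStepB, hs]
          rw [hstep, ih t hlt (result ++ [l]) 0 buf]
          rw [show clean_format2_blocks (l :: t) = l :: clean_format2_blocks t from by
              rw [clean_format2_blocks]; simp [hs]]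
          simp
      · -- inside a block
        simp only [if_neg hd]
        by_cases hs1 : PySem.Str.strip l = "["
        · rw [List.foldl_cons]
          have hstep : pvStepB (result, depth, buf) l = (result, depth + 1, buf ++ [l]) := by
            simp [pvStepB, hd, hs1]
          rw [hstep, ih t hlt result (depth + 1) (buf ++ [l])]
          have hc : pvCollectA (l :: t) depth =
              (l :: (pvCollectA t (depth + 1)).1, (pvCollectA t (depth + 1)).2) := by
            simp [pvCollectA, hs1]
          rw [hc]
          simp
        · by_cases hs2 : PySem.Str.strip l = "]"
          · by_cases h1 : depth = 1
            · subst h1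
              rw [List.foldl_cons]
              have hstep : pvStepB (result, 1, buf) l = (result ++ pvFlushB buf, 0, buf) := by
                simp [pvStepB, hs2]
              rw [hstep, ih t hlt (result ++ pvFlushB buf) 0 buf]
              have hc : pvCollectA (l :: t) 1 = ([], t) := by
                simp [pvCollectA, hs2]
              rw [hc]
              simp [pvFlushB_eq_pvBodyA]
            · rw [List.foldl_cons]
              have hstep : pvStepB (result, depth, buf) l = (result, depth - 1, buf ++ [l]) := by
                have : depth - 1 ≠ 0 := by omega
                simp [pvStepB, hd, hs2, this]
              rw [hstep, ih t hlt result (depth - 1) (buf ++ [l])]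
              have hc : pvCollectA (l :: t) depth =
                  (l :: (pvCollectA t (depth - 1)).1, (pvCollectA t (depth - 1)).2) := by
                simp [pvCollectA, hs2, h1]
              rw [hc]
              have : depth - 1 ≠ 0 := by omega
              simp [this]
          · rw [List.foldl_cons]
            have hstep : pvStepB (result, depth, buf) l = (result, depth, buf ++ [l]) := by
              simp [pvStepB, hd, hs1, hs2]
            rw [hstep, ih t hlt result depth (buf ++ [l])]
            have hc : pvCollectA (l :: t) depth =
                (l :: (pvCollectA t depth).1, (pvCollectA t depth).2) := by
              simp [pvCollectA, hs1, hs2]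
            rw [hc]
            simp [hd]

-- ===== VERDICT (by name: the statement is the Claim_ definition above) =====
theorem clean_format2_blocks_spec : Claim_equal_clean_format2_blocks := by
  intro lines _
  unfold Spec_clean_format2_blocks
  rw [alt_eq_finish, pvMain lines.length lines (le_refl _) [] 0 []]
  simp
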